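-- pv_equiv track=rewrite | github.com/arjunreddy20/prog | python_main/GCD using dp.py | find_greatness
-- ===== SOURCE A (Python) =====
-- def gcf(a,b):
--     while b:
--         a,b=b,a%b        #finds greatest common divisor b/w 2 elements
--     return a
--
-- def find_greatness(n,arr):
--
--     dp=[[0]*(n+1) for _ in range(n)]      #creates dp table of n+1*n size
--     result=[0]*n          #creates array  of size n
--
--     for i in range(0,n):
--         dp[i][1]=arr[i]                        # for first column of dp table
--         result[0]=max(result[0],arr[i])
--
--     for length in range(2,n+1):
--         for i in range(0,n-length+1):                       # for rest of columns of dp table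
--             dp[i][length]=gcf(dp[i][length-1],arr[i+length-1])
--             result[length-1]=max(result[length-1],dp[i][length])
--     return result
-- ===== SOURCE B (Python) =====
-- def _gcd(a, b):
--     while b:
--         a, b = b, a % b
--     return a
--
-- def find_greatness(n, arr):
--     best = [0] * (n + 1)      # best[L] = best value seen for window length L
--     stack = []                # (g, l): distinct gcds of windows ending here, l = least start
--     for j in range(n):
--         x = arr[j]
--         nxt = []
--         for g, l in stack:
--             g = _gcd(g, x)
--             if not nxt or nxt[-1][0] != g:
--                 nxt.append((g, l))
--         if not nxt or nxt[-1][0] != x: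
--             nxt.append((x, j))
--         stack = nxt
--         for g, l in stack:
--             if g > best[j - l + 1]:
--                 best[j - l + 1] = g
--     for L in range(n - 1, 0, -1):   # best-for-length is non-increasing
--         if best[L] < best[L + 1]:
--             best[L] = best[L + 1]
--     return best[1:]
-- ===== Notes on version B (the rewrite author's own statement) =====
-- stated objective: faster
-- what changed: Instead of an n x (n+1) DP table filled per length, B sweeps right endpoints keeping only the O(log V) distinct window gcds ending there (with their least start), records each as a candidate for its longest length, and recovers all lengths by one suffix-max pass (the clamped best-per-length is non-increasing).
import Mathlib
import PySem

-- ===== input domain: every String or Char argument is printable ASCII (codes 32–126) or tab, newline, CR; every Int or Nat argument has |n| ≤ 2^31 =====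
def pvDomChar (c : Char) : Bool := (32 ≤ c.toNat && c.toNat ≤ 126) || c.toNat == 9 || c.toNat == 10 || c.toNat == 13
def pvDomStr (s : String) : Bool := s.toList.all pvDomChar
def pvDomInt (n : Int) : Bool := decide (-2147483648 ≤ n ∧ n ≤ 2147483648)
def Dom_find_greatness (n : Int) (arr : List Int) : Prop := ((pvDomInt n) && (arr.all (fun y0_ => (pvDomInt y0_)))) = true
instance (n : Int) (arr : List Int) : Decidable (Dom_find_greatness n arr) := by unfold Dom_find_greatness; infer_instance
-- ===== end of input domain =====

-- B replaces A's per-length DP table by a right-endpoint sweep keeping the distinct window gcds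
-- ending there, plus one suffix-max pass (objective: faster; measured by the check).

-- ===== PORT A =====

-- termination of Python's Euclid loop: |a % b| < |b| for b ≠ 0 (Python mod has the divisor's sign)
theorem pvModAbsLt (a b : Int) (hb : ¬ b = 0) : (PySem.Int.mod a b).natAbs < b.natAbs := by
  rcases lt_trichotomy b 0 with h | h | h
  · have := PySem.Int.mod_neg_bounds a h
    omega
  · exact absurd h hb
  · have h1 := PySem.Int.mod_nonneg a h
    have h2 := PySem.Int.mod_lt a h
    omega

def gcf (a b : Int) : Int :=
  if hb : b = 0 then a
  else gcf b (PySem.Int.mod a b)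
termination_by b.natAbs
decreasing_by exact pvModAbsLt a b hb

def find_greatness (n : Int) (arr : List Int) : List Int :=
  let dp : List (List Int) :=
    (PySem.List.pyRange 0 n 1).map (fun _ => List.replicate (n + 1).toNat 0)
  let result : List Int := List.replicate n.toNat 0
  let st1 := (PySem.List.pyRange 0 n 1).foldl
    (fun (st : List (List Int) × List Int) i =>
      let ai := PySem.List.pyGetD arr i 0
      ( PySem.List.pySetD st.1 i (PySem.List.pySetD (PySem.List.pyGetD st.1 i []) 1 ai),
        PySem.List.pySetD st.2 0 (max (PySem.List.pyGetD st.2 0 0) ai) ))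
    (dp, result)
  let st2 := (PySem.List.pyRange 2 (n + 1) 1).foldl
    (fun st length =>
      (PySem.List.pyRange 0 (n - length + 1) 1).foldl
        (fun (st : List (List Int) × List Int) i =>
          let row := PySem.List.pyGetD st.1 i []
          let v := gcf (PySem.List.pyGetD row (length - 1) 0)
                       (PySem.List.pyGetD arr (i + length - 1) 0)
          ( PySem.List.pySetD st.1 i (PySem.List.pySetD row length v),
            PySem.List.pySetD st.2 (length - 1)
              (max (PySem.List.pyGetD st.2 (length - 1) 0) v) ))
        st)
    st1
  st2.2

-- ===== PORT B =====

def find_greatness_alt (n : Int) (arr : List Int) : List Int :=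
  let best : List Int := List.replicate (n + 1).toNat 0
  let st := (PySem.List.pyRange 0 n 1).foldl
    (fun (st : List (Int × Int) × List Int) j =>
      let x := PySem.List.pyGetD arr j 0
      let nxt := st.1.foldl
        (fun (nxt : List (Int × Int)) gl =>
          let g := gcf gl.1 x
          if nxt.getLast?.map Prod.fst = some g then nxt else nxt ++ [(g, gl.2)])
        []
      let nxt := if nxt.getLast?.map Prod.fst ≠ some x then nxt ++ [(x, j)] else nxt
      let best' := nxt.foldl
        (fun best gl =>
          if gl.1 > PySem.List.pyGetD best (j - gl.2 + 1) 0
          then PySem.List.pySetD best (j - gl.2 + 1) gl.1 else best)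
        st.2
      (nxt, best'))
    ([], best)
  let bestF := (PySem.List.pyRange (n - 1) 0 (-1)).foldl
    (fun best L =>
      if PySem.List.pyGetD best L 0 < PySem.List.pyGetD best (L + 1) 0
      then PySem.List.pySetD best L (PySem.List.pyGetD best (L + 1) 0) else best)
    st.2
  PySem.List.slice bestF (some 1) none

-- ===== PRECONDITION & SPEC =====

-- A indexes arr[i] for every i < n, so it raises IndexError iff n exceeds len(arr); nothing else is excluded.
def Pre_find_greatness (n : Int) (arr : List Int) : Prop := n ≤ (arr.length : Int)
instance (n : Int) (arr : List Int) : Decidable (Pre_find_greatness n arr) := by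
  unfold Pre_find_greatness; infer_instance

def pvWitness_find_greatness : Int × List Int := (3, [4, -6, 2])

def Spec_find_greatness (n : Int) (arr : List Int) (out : List Int) : Prop := out = find_greatness_alt n arr
instance (n : Int) (arr : List Int) (out : List Int) : Decidable (Spec_find_greatness n arr out) := by unfold Spec_find_greatness; infer_instance

-- ===== CLAIM (what is proved, stated in full; the proofs are below) =====
def Claim_equal_find_greatness : Prop := ∀ (n : Int) (arr : List Int), Dom_find_greatness n arr → Pre_find_greatness n arr → Spec_find_greatness n arr (find_greatness n arr)

-- ===== LEMMAS AND PROOFS =====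

-- ======== math core ========

def NG (w : List Int) : Nat := w.foldr (fun x g => Nat.gcd x.natAbs g) 0
def Vw (w : List Int) : Int := w.foldl gcf 0
def TS (s : Int) (w : List Int) : Int :=
  w.foldl (fun s x => if x > 0 then 1 else if x < 0 then -1 else s) s
def win (a : List Int) (i L : Nat) : List Int := (a.drop i).take L
def Rbest (a : List Int) (L : Nat) : Int :=
  ((List.range (a.length + 1 - L)).map (fun i => Vw (win a i L))).foldl max 0

theorem gcf_eq (a b : Int) (hb : b ≠ 0) : gcf a b = b.sign * (Int.gcd a b : Int) := by
  rw [gcf, dif_neg hb]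
  by_cases hm : PySem.Int.mod a b = 0
  · rw [hm, gcf, dif_pos rfl]
    have hd : b ∣ a := (PySem.Int.mod_eq_zero_iff_dvd a b).1 hm
    rw [Int.gcd_comm, Int.gcd_eq_natAbs_left hd, Int.sign_mul_natAbs]
  · rw [gcf_eq b (PySem.Int.mod a b) hm]
    have hq := PySem.Int.floordiv_mul_add_mod a b
    have hmod : PySem.Int.mod a b = a - PySem.Int.floordiv a b * b := by linarith
    have hg : Int.gcd b (PySem.Int.mod a b) = Int.gcd a b := by
      rw [hmod, Int.gcd_sub_mul_right_right, Int.gcd_comm]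
    have hs : (PySem.Int.mod a b).sign = b.sign := by
      rcases lt_trichotomy b 0 with h | h | h
      · have := PySem.Int.mod_neg_bounds a h
        rw [Int.sign_eq_neg_one_of_neg (by omega), Int.sign_eq_neg_one_of_neg h]
      · exact absurd h hb
      · have h1 := PySem.Int.mod_nonneg a h
        have h2 := PySem.Int.mod_lt a h
        rw [Int.sign_eq_one_of_pos (by omega), Int.sign_eq_one_of_pos h]
    rw [hg, hs]
termination_by b.natAbs
decreasing_by exact pvModAbsLt a b hb

-- NG facts
theorem NG_nil : NG [] = 0 := rfl
theorem NG_cons (y : Int) (w : List Int) : NG (y :: w) = Nat.gcd y.natAbs (NG w) := rfl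
theorem NG_singleton (y : Int) : NG [y] = y.natAbs := by simp [NG]
theorem NG_append (w v : List Int) : NG (w ++ v) = Nat.gcd (NG w) (NG v) := by
  induction w with
  | nil => simp [NG]
  | cons x t ih => rw [List.cons_append, NG_cons, NG_cons, ih, Nat.gcd_assoc]
theorem NG_snoc (w : List Int) (y : Int) : NG (w ++ [y]) = Nat.gcd (NG w) y.natAbs := by
  rw [NG_append, NG_singleton]
theorem NG_dvd_mem (w : List Int) (y : Int) (hy : y ∈ w) : NG w ∣ y.natAbs := by
  induction w with
  | nil => cases hy
  | cons x t ih =>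
      rw [NG_cons]
      rcases List.mem_cons.1 hy with h | h
      · subst h; exact Nat.gcd_dvd_left _ _
      · exact dvd_trans (Nat.gcd_dvd_right _ _) (ih h)
theorem NG_cons_dvd (x : Int) (w : List Int) : NG (x :: w) ∣ NG w := by
  rw [NG_cons]; exact Nat.gcd_dvd_right _ _

-- Vw facts
theorem Vw_nil : Vw [] = 0 := rfl
theorem Vw_snoc (w : List Int) (y : Int) : Vw (w ++ [y]) = gcf (Vw w) y := by
  simp [Vw]
theorem Vw_singleton (y : Int) : Vw [y] = y := by
  have : Vw [y] = gcf 0 y := rfl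
  rw [this]
  by_cases h : y = 0
  · subst h; rw [gcf, dif_pos rfl]
  · rw [gcf_eq 0 y h, Int.gcd_comm, Int.gcd_zero_right, Int.sign_mul_natAbs]

-- TS facts
theorem TS_snoc (s : Int) (w : List Int) (y : Int) :
    TS s (w ++ [y]) = if y > 0 then 1 else if y < 0 then -1 else TS s w := by
  simp [TS]
theorem TS_mem (s : Int) (w : List Int) (hs : s = 1 ∨ s = -1) :
    TS s w = 1 ∨ TS s w = -1 := by
  induction w generalizing s with
  | nil => exact hs
  | cons x t ih =>
      have : TS s (x :: t) = TS (if x > 0 then 1 else if x < 0 then -1 else s) t := rfl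
      rw [this]
      apply ih
      split_ifs with h1 h2
      · left; rfl
      · right; rfl
      · exact hs
theorem Vw_eq_TS_mul_NG (w : List Int) (s : Int) (hs : s = 1 ∨ s = -1) :
    Vw w = TS s w * (NG w : Int) := by
  induction w using List.reverseRecOn with
  | nil => simp [Vw_nil, NG_nil]
  | append_singleton t y ih =>
      rw [Vw_snoc, TS_snoc, NG_snoc]
      by_cases hy : y = 0
      · subst hy
        rw [gcf, dif_pos rfl, ih]
        simp
      · rw [gcf_eq _ y hy]
        have habs : (Vw t).natAbs = NG t := by
          rw [ih]
          rcases TS_mem s t hs with h | h <;> rw [h] <;> simp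
        have hg : Int.gcd (Vw t) y = Nat.gcd (NG t) y.natAbs := by
          rw [Int.gcd_def, habs]
        rw [hg]
        rcases lt_trichotomy y 0 with h | h | h
        · rw [Int.sign_eq_neg_one_of_neg h]
          simp [h, not_lt.2 (le_of_lt h)]
        · exact absurd h hy
        · rw [Int.sign_eq_one_of_pos h]
          simp [h]


-- window and Rbest facts
theorem win_snoc (a : List Int) (i L : Nat) (h : i + L < a.length) :
    win a i (L + 1) = win a i L ++ [a.getD (i + L) 0] := by
  unfold win
  rw [List.take_succ]
  congr 1
  have h1 : (a.drop i)[L]? = some (a.getD (i + L) 0) := by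
    rw [List.getElem?_drop]
    rw [List.getD_eq_getElem a 0 h]
    exact List.getElem?_eq_getElem (by omega)
  rw [h1]
  rfl

theorem win_tail (a : List Int) (i L : Nat) :
    (win a i (L + 1)).tail = win a (i + 1) L := by
  unfold win
  have h1 : ∀ (xs : List Int) (n : Nat), (xs.take (n+1)).tail = xs.tail.take n := by
    intro xs n
    induction xs with
    | nil => simp
    | cons x t ih => simp
  rw [h1, List.tail_drop]

theorem foldl_max_le_of (xs : List Int) (b c : Int) (hb : b ≤ c) (h : ∀ y ∈ xs, y ≤ c) :
    xs.foldl max b ≤ c := by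
  induction xs generalizing b with
  | nil => exact hb
  | cons x t ih =>
      exact ih (max b x) (max_le hb (h x List.mem_cons_self)) (fun y hy => h y (List.mem_cons_of_mem _ hy))

theorem Rbest_nonneg (a : List Int) (L : Nat) : 0 ≤ Rbest a L :=
  (PySem.List.le_foldl_max _ 0).1

theorem Vw_le_Rbest (a : List Int) (i L : Nat) (h : i < a.length + 1 - L) :
    Vw (win a i L) ≤ Rbest a L := by
  apply (PySem.List.le_foldl_max _ 0).2
  exact List.mem_map_of_mem (List.mem_range.2 h)

theorem Rbest_succ_le (a : List Int) (L : Nat) (hL : 1 ≤ L) (h : L + 1 ≤ a.length) :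
    Rbest a (L + 1) ≤ Rbest a L := by
  apply foldl_max_le_of _ _ _ (Rbest_nonneg a L)
  intro y hy
  rcases List.mem_map.1 hy with ⟨i, hi, rfl⟩
  have hi' : i < a.length - L := by
    have := List.mem_range.1 hi; omega
  by_cases hpos : Vw (win a i (L + 1)) ≤ 0
  · exact le_trans hpos (Rbest_nonneg a L)
  push_neg at hpos
  have hiL : i + L < a.length := by omega
  have hsnoc := win_snoc a i L hiL
  obtain ⟨x, hx⟩ : ∃ x, a.getD (i + L) 0 = x := ⟨_, rfl⟩
  rw [hx] at hsnoc
  by_cases hx0 : x = 0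
  · rw [hsnoc, Vw_snoc, hx0, gcf, dif_pos rfl]
    exact Vw_le_Rbest a i L (by omega)
  · have htlw := win_tail a i L
    obtain ⟨w, hw⟩ : ∃ w, win a i (L + 1) = w := ⟨_, rfl⟩
    rw [hw] at hsnoc hpos htlw
    have hTS := Vw_eq_TS_mul_NG w 1 (Or.inl rfl)
    have hts1 : TS 1 w = 1 := by
      rcases TS_mem 1 w (Or.inl rfl) with h1 | h1
      · exact h1
      · rw [h1] at hTS; rw [hTS] at hpos; omega
    rw [hts1, one_mul] at hTS
    have hwne : w ≠ [] := by rw [hsnoc]; simp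
    have hdvd : NG w ∣ NG (win a (i + 1) L) := by
      rw [← htlw]
      cases w with
      | nil => exact absurd rfl hwne
      | cons yh yt => exact NG_cons_dvd yh yt
    have hLL : (L - 1) + 1 = L := by omega
    have htlsnoc : win a (i + 1) L = win a (i + 1) (L - 1) ++ [x] := by
      have h2 := win_snoc a (i + 1) (L - 1) (show i + 1 + (L - 1) < a.length by omega)
      rw [show i + 1 + (L - 1) = i + L from by omega, hx] at h2
      conv_lhs => rw [← hLL]
      exact h2
    have hxtl : x ∈ win a (i + 1) L := by rw [htlsnoc]; simp
    have hNGtl : NG (win a (i + 1) L) ≠ 0 := by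
      intro h0
      have := NG_dvd_mem _ x hxtl
      rw [h0] at this
      exact hx0 (Int.natAbs_eq_zero.1 (Nat.eq_zero_of_zero_dvd this))
    have htstl : TS 1 (win a (i + 1) L) = TS 1 w := by
      rw [htlsnoc, TS_snoc, hsnoc, TS_snoc]
      split_ifs <;> first | rfl | omega
    have hVtl : Vw (win a (i + 1) L) = (NG (win a (i + 1) L) : Int) := by
      rw [Vw_eq_TS_mul_NG _ 1 (Or.inl rfl), htstl, hts1, one_mul]
    have hle : Vw w ≤ Vw (win a (i + 1) L) := by
      rw [hTS, hVtl]
      exact_mod_cast Nat.le_of_dvd (Nat.pos_of_ne_zero hNGtl) hdvd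
    rw [hw]
    exact le_trans hle (Vw_le_Rbest a (i + 1) L (by omega))

theorem Rbest_antitone (a : List Int) (L L' : Nat) (h1 : 1 ≤ L) (h2 : L ≤ L') (h3 : L' ≤ a.length) :
    Rbest a L' ≤ Rbest a L := by
  induction L' with
  | zero => omega
  | succ M ih =>
      by_cases hM : L = M + 1
      · subst hM; rfl
      · exact le_trans (Rbest_succ_le a M (by omega) (by omega)) (ih (by omega) (by omega))


-- ===== generic list helpers =====
theorem getD_take (xs : List Int) (N m : Nat) (d : Int) (h : m < N) :
    (xs.take N).getD m d = xs.getD m d := by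
  simp [List.getD, List.getElem?_take_of_lt h]

theorem map_range_set {α : Type} (N m : Nat) (f : Nat → α) (v : α) :
    ((List.range N).map f).set m v = (List.range N).map (fun i => if i = m then v else f i) := by
  apply List.ext_getElem
  · simp
  · intro i h1 h2
    simp only [List.getElem_set, List.getElem_map, List.getElem_range]
    split_ifs <;> first | rfl | omega

theorem map_const_replicate {α : Type} (N : Nat) (v : α) :
    (List.range N).map (fun _ => v) = List.replicate N v := by
  simp

theorem getD_set_zero (l : List Int) (c d : Int) (h : l ≠ []) :
    (l.set 0 c).getD 0 d = c := by
  cases l with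
  | nil => exact absurd rfl h
  | cons x t => rfl

theorem take_succ_foldl_max (a : List Int) (m : Nat) (h : m < a.length) :
    (a.take (m+1)).foldl max 0 = max ((a.take m).foldl max 0) (a.getD m 0) := by
  rw [List.take_succ]
  have : a[m]? = some (a.getD m 0) := by
    rw [List.getD_eq_getElem a 0 h]
    exact List.getElem?_eq_getElem h
  rw [this]
  simp [List.foldl_append]

theorem win_one (a : List Int) (i : Nat) (h : i < a.length) :
    win a i 1 = [a.getD i 0] := by
  have h0 := win_snoc a i 0 (by omega)
  simpa [win] using h0

theorem pyRange_zero_cast (n : Int) :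
    PySem.List.pyRange 0 n 1 = (List.range n.toNat).map (fun k : Nat => (k : Int)) := by
  rw [PySem.List.pyRange_one]
  simp

-- ===== A-side state characterisation =====
def row0 (N : Nat) : List Int := List.replicate (N+1) (0:Int)
def rowB (a : List Int) (N i ℓ : Nat) : List Int :=
  (List.range (N+1)).map (fun L => if 1 ≤ L ∧ L ≤ ℓ ∧ i + L ≤ N then Vw (win a i L) else 0)
def partA (a : List Int) (ℓ p : Nat) : Int :=
  ((List.range p).map (fun i => Vw (win a i ℓ))).foldl max 0

theorem partA_succ (a : List Int) (ℓ p : Nat) :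
    partA a ℓ (p+1) = max (partA a ℓ p) (Vw (win a p ℓ)) := by
  unfold partA
  rw [List.range_succ, List.map_append, List.foldl_append]
  rfl

theorem partA_full (a : List Int) (ℓ : Nat) : partA a ℓ (a.length + 1 - ℓ) = Rbest a ℓ := rfl

def stepA1 (arr : List Int) (st : List (List Int) × List Int) (i : Int) :
    List (List Int) × List Int :=
  let ai := PySem.List.pyGetD arr i 0
  ( PySem.List.pySetD st.1 i (PySem.List.pySetD (PySem.List.pyGetD st.1 i []) 1 ai),
    PySem.List.pySetD st.2 0 (max (PySem.List.pyGetD st.2 0 0) ai) )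

def stepA2 (arr : List Int) (length : Int) (st : List (List Int) × List Int) (i : Int) :
    List (List Int) × List Int :=
  let row := PySem.List.pyGetD st.1 i []
  let v := gcf (PySem.List.pyGetD row (length - 1) 0)
               (PySem.List.pyGetD arr (i + length - 1) 0)
  ( PySem.List.pySetD st.1 i (PySem.List.pySetD row length v),
    PySem.List.pySetD st.2 (length - 1)
      (max (PySem.List.pyGetD st.2 (length - 1) 0) v) )

def stepA2o (arr : List Int) (n : Int) (st : List (List Int) × List Int) (length : Int) :
    List (List Int) × List Int :=
  (PySem.List.pyRange 0 (n - length + 1) 1).foldl (stepA2 arr length) st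

theorem find_greatness_as_folds (n : Int) (arr : List Int) :
    find_greatness n arr =
      ((PySem.List.pyRange 2 (n+1) 1).foldl (stepA2o arr n)
        ((PySem.List.pyRange 0 n 1).foldl (stepA1 arr)
          ((PySem.List.pyRange 0 n 1).map (fun _ => List.replicate (n+1).toNat 0),
           List.replicate n.toNat 0))).2 := rfl

def dpA (a : List Int) (N m : Nat) : List (List Int) :=
  (List.range N).map (fun i => if i < m then rowB a N i 1 else row0 N)
def resA (a : List Int) (N m : Nat) : List Int :=
  (List.replicate N (0:Int)).set 0 ((a.take m).foldl max 0)

def dpI (a : List Int) (N ℓ p : Nat) : List (List Int) :=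
  (List.range N).map (fun i => if i < p then rowB a N i ℓ else rowB a N i (ℓ-1))
def resI (a : List Int) (N ℓ p : Nat) : List Int :=
  (List.range N).map (fun L0 =>
    if L0 < ℓ-1 then Rbest a (L0+1) else if L0 = ℓ-1 then partA a ℓ p else 0)
def dpB (a : List Int) (N ℓ : Nat) : List (List Int) :=
  (List.range N).map (fun i => rowB a N i ℓ)
def resB (a : List Int) (N ℓ : Nat) : List Int :=
  (List.range N).map (fun L0 => if L0 < ℓ then Rbest a (L0+1) else 0)

theorem row0_set_one (a : List Int) (N i : Nat) (hi : i < N) (ha : a.length = N) :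
    (row0 N).set 1 (a.getD i 0) = rowB a N i 1 := by
  unfold row0 rowB
  rw [← map_const_replicate (N+1) (0:Int), map_range_set]
  apply List.map_congr_left
  intro L hL
  have hLr := List.mem_range.1 hL
  by_cases h : L = 1
  · subst h
    rw [if_pos rfl, if_pos (by omega)]
    rw [win_one a i (by omega)]
    rw [Vw_singleton]
  · rw [if_neg h, if_neg (by omega)]

-- loop 1 invariant
theorem loop1_inv (arr : List Int) (N : Nat) (hN : 1 ≤ N) (hle : N ≤ arr.length)
    (m : Nat) (hm : m ≤ N) :
    ((List.range m).map (fun k : Nat => (k : Int))).foldl (stepA1 arr)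
      (List.replicate N (row0 N), List.replicate N 0)
    = (dpA (arr.take N) N m, resA (arr.take N) N m) := by
  induction m with
  | zero =>
      simp only [List.range_zero, List.map_nil, List.foldl_nil]
      unfold dpA resA
      rw [Prod.mk.injEq]
      constructor
      · rw [← map_const_replicate N (row0 N)]
        apply List.map_congr_left
        intro i _
        rw [if_neg (by omega)]
      · simp only [List.take_zero, List.foldl_nil]
        cases N with
        | zero => omega
        | succ M => rfl
  | succ m ih =>
      rw [List.range_succ, List.map_append, List.foldl_append, ih (by omega)]
      simp only [List.map_cons, List.map_nil, List.foldl_cons, List.foldl_nil]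
      unfold stepA1
      simp only [Prod.mk.injEq]
      have ha : (arr.take N).length = N := by
        rw [List.length_take]; omega
      have hai : PySem.List.pyGetD arr (↑m) 0 = (arr.take N).getD m 0 := by
        rw [PySem.List.pyGetD_natCast, getD_take arr N m 0 (by omega)]
      have hdget : PySem.List.pyGetD (dpA (arr.take N) N m) (↑m) [] = row0 N := by
        rw [PySem.List.pyGetD_natCast]
        unfold dpA
        rw [List.getD_eq_getElem _ _ (by simp; omega)]
        simp only [List.getElem_map, List.getElem_range]
        rw [if_neg (by omega)]
      have hrget : PySem.List.pyGetD (resA (arr.take N) N m) 0 0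
          = ((arr.take N).take m).foldl max 0 := by
        rw [PySem.List.pyGetD_zero]
        unfold resA
        apply getD_set_zero
        simp; omega
      refine ⟨?_, ?_⟩
      · -- dp component
        rw [hai, hdget]
        have h1 : PySem.List.pySetD (row0 N) 1 ((arr.take N).getD m 0)
            = rowB (arr.take N) N m 1 := by
          rw [show (1:Int) = ((1:Nat):Int) from rfl, PySem.List.pySetD_natCast]
          exact row0_set_one (arr.take N) N m (by omega) ha
        rw [h1, PySem.List.pySetD_natCast]
        unfold dpA
        rw [map_range_set]
        apply List.map_congr_left
        intro i hi
        by_cases hc : i = m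
        · subst hc; rw [if_pos rfl, if_pos (by omega)]
        · rw [if_neg hc]
          by_cases hc2 : i < m
          · rw [if_pos hc2, if_pos (by omega)]
          · rw [if_neg hc2, if_neg (by omega)]
      · -- result component
        rw [hai, hrget, PySem.List.pySetD_of_nonneg _ _ (by norm_num)]
        unfold resA
        rw [show ((0:Int)).toNat = 0 from rfl, List.set_set]
        rw [← take_succ_foldl_max (arr.take N) m (by omega)]

theorem dpA_full_eq (a : List Int) (N : Nat) : dpA a N N = dpB a N 1 := by
  unfold dpA dpB
  apply List.map_congr_left
  intro i hi
  rw [if_pos (List.mem_range.1 hi)]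

theorem resA_full_eq (a : List Int) (N : Nat) (hN : 1 ≤ N) (ha : a.length = N) :
    resA a N N = resB a N 1 := by
  unfold resA resB
  have h1 : a.take N = a := by rw [← ha, List.take_length]
  have h2 : a.foldl max 0 = Rbest a 1 := by
    unfold Rbest
    congr 1
    apply List.ext_getElem
    · simp [ha]
    · intro i hh1 hh2
      simp only [List.getElem_map, List.getElem_range]
      have hi : i < a.length := by simpa using hh1
      rw [win_one a i hi, Vw_singleton, List.getD_eq_getElem a 0 hi]
  rw [h1, h2, ← map_const_replicate N (0:Int), map_range_set]
  apply List.map_congr_left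
  intro L0 hL0
  split_ifs with hc1 hc2
  · subst hc1; rfl
  · omega
  · omega
  · rfl


theorem map_ignore {α β : Type} (l : List α) (c : β) :
    l.map (fun _ => c) = List.replicate l.length c := by
  induction l with
  | nil => rfl
  | cons x t ih => simp [ih, List.replicate_succ]

theorem rowB_set (a : List Int) (N p ℓ : Nat) (h2 : 2 ≤ ℓ) (hpN : p + ℓ ≤ N) :
    (rowB a N p (ℓ-1)).set ℓ (Vw (win a p ℓ)) = rowB a N p ℓ := by
  unfold rowB
  rw [map_range_set]
  apply List.map_congr_left
  intro L hL
  by_cases hc : L = ℓ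
  · subst hc; rw [if_pos rfl, if_pos (by omega)]
  · rw [if_neg hc]
    split_ifs <;> first | rfl | omega

theorem rowB_stable (a : List Int) (N i ℓ : Nat) (h2 : 2 ≤ ℓ) (h : N < i + ℓ) :
    rowB a N i ℓ = rowB a N i (ℓ-1) := by
  unfold rowB
  apply List.map_congr_left
  intro L hL
  split_ifs <;> first | rfl | omega

theorem dpI0 (a : List Int) (N ℓ : Nat) : dpI a N ℓ 0 = dpB a N (ℓ-1) := by
  unfold dpI dpB
  apply List.map_congr_left
  intro i _
  rw [if_neg (by omega)]

theorem resI0 (a : List Int) (N ℓ : Nat) : resI a N ℓ 0 = resB a N (ℓ-1) := by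
  unfold resI resB
  apply List.map_congr_left
  intro L0 _
  split_ifs <;> first | rfl | omega | (unfold partA; rfl)

theorem dpI_full (a : List Int) (N ℓ : Nat) (h2 : 2 ≤ ℓ) (hℓN : ℓ ≤ N) :
    dpI a N ℓ (N + 1 - ℓ) = dpB a N ℓ := by
  unfold dpI dpB
  apply List.map_congr_left
  intro i hi
  by_cases hc : i < N + 1 - ℓ
  · rw [if_pos hc]
  · rw [if_neg hc, rowB_stable a N i ℓ h2 (by omega)]

theorem resI_full (a : List Int) (N ℓ : Nat) (h2 : 2 ≤ ℓ) (hℓN : ℓ ≤ N) (ha : a.length = N) :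
    resI a N ℓ (N + 1 - ℓ) = resB a N ℓ := by
  unfold resI resB
  apply List.map_congr_left
  intro L0 hL0
  by_cases hc : L0 < ℓ - 1
  · rw [if_pos hc, if_pos (by omega)]
  · rw [if_neg hc]
    by_cases hc2 : L0 = ℓ - 1
    · rw [if_pos hc2, if_pos (by omega)]
      have : partA a ℓ (N + 1 - ℓ) = Rbest a ℓ := by
        rw [← ha] at hℓN ⊢
        rw [partA_full]
      rw [this, hc2]
      congr 1
      omega
    · rw [if_neg hc2, if_neg (by omega)]

theorem loop2_inner (arr : List Int) (N : Nat) (hle : N ≤ arr.length) (ℓ : Nat)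
    (h2 : 2 ≤ ℓ) (hℓN : ℓ ≤ N) (p : Nat) (hp : p ≤ N + 1 - ℓ) :
    ((List.range p).map (fun k : Nat => (k : Int))).foldl (stepA2 arr (↑ℓ))
      (dpI (arr.take N) N ℓ 0, resI (arr.take N) N ℓ 0)
    = (dpI (arr.take N) N ℓ p, resI (arr.take N) N ℓ p) := by
  have ha : (arr.take N).length = N := by rw [List.length_take]; omega
  induction p with
  | zero => simp
  | succ p ih =>
      rw [List.range_succ, List.map_append, List.foldl_append, ih (by omega)]
      simp only [List.map_cons, List.map_nil, List.foldl_cons, List.foldl_nil]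
      unfold stepA2
      simp only [Prod.mk.injEq]
      have hpN : p + ℓ ≤ N := by omega
      have hrow : PySem.List.pyGetD (dpI (arr.take N) N ℓ p) (↑p) []
          = rowB (arr.take N) N p (ℓ-1) := by
        rw [PySem.List.pyGetD_natCast]
        unfold dpI
        rw [List.getD_eq_getElem _ _ (by simp; omega)]
        simp only [List.getElem_map, List.getElem_range]
        rw [if_neg (by omega)]
      rw [hrow]
      have hv : gcf (PySem.List.pyGetD (rowB (arr.take N) N p (ℓ-1)) ((ℓ:Int) - 1) 0)
                    (PySem.List.pyGetD arr ((p:Int) + (ℓ:Int) - 1) 0)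
          = Vw (win (arr.take N) p ℓ) := by
        rw [show ((ℓ:Int) - 1) = ((ℓ-1 : Nat) : Int) from by omega, PySem.List.pyGetD_natCast]
        rw [show ((p:Int) + (ℓ:Int) - 1) = ((p+ℓ-1 : Nat) : Int) from by omega,
            PySem.List.pyGetD_natCast]
        unfold rowB
        rw [PySem.List.getD_map_range _ _ _ _ (by omega), if_pos (by omega)]
        rw [← getD_take arr N (p+ℓ-1) 0 (by omega)]
        have hsn := win_snoc (arr.take N) p (ℓ-1) (by rw [ha]; omega)
        rw [show p + (ℓ-1) = p+ℓ-1 from by omega] at hsn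
        rw [show (ℓ-1)+1 = ℓ from by omega] at hsn
        rw [hsn, Vw_snoc]
      rw [hv]
      refine ⟨?_, ?_⟩
      · rw [PySem.List.pySetD_natCast, PySem.List.pySetD_natCast,
            rowB_set (arr.take N) N p ℓ h2 hpN]
        unfold dpI
        rw [map_range_set]
        apply List.map_congr_left
        intro i hi
        by_cases hc : i = p
        · subst hc; rw [if_pos rfl, if_pos (by omega)]
        · rw [if_neg hc]
          by_cases hc2 : i < p
          · rw [if_pos hc2, if_pos (by omega)]
          · rw [if_neg hc2, if_neg (by omega)]
      · rw [show ((ℓ:Int) - 1) = ((ℓ-1 : Nat) : Int) from by omega]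
        have hres : PySem.List.pyGetD (resI (arr.take N) N ℓ p) ((ℓ-1 : Nat) : Int) 0
            = partA (arr.take N) ℓ p := by
          rw [PySem.List.pyGetD_natCast]
          unfold resI
          rw [PySem.List.getD_map_range _ _ _ _ (by omega)]
          rw [if_neg (by omega), if_pos rfl]
        rw [hres, ← partA_succ, PySem.List.pySetD_natCast]
        unfold resI
        rw [map_range_set]
        apply List.map_congr_left
        intro L0 hL0
        by_cases hc : L0 = ℓ-1
        · subst hc; rw [if_pos rfl, if_neg (by omega), if_pos rfl]
        · rw [if_neg hc]
          split_ifs <;> first | rfl | omega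

theorem loop2_outer (arr : List Int) (N : Nat) (hN : 1 ≤ N) (hle : N ≤ arr.length)
    (n : Int) (hn : n = (N : Int)) (m : Nat) (hm : m ≤ N - 1) :
    ((List.range m).map (fun k : Nat => (2 + (k:Int)))).foldl (stepA2o arr n)
      (dpB (arr.take N) N 1, resB (arr.take N) N 1)
    = (dpB (arr.take N) N (m+1), resB (arr.take N) N (m+1)) := by
  have ha : (arr.take N).length = N := by rw [List.length_take]; omega
  induction m with
  | zero => simp
  | succ m ih =>
      rw [List.range_succ, List.map_append, List.foldl_append, ih (by omega)]
      simp only [List.map_cons, List.map_nil, List.foldl_cons, List.foldl_nil]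
      unfold stepA2o
      have hℓ : (2 + (m:Int)) = ((m+2 : Nat) : Int) := by omega
      rw [hℓ]
      have hcnt : n - ((m+2 : Nat) : Int) + 1 = ((N - m - 1 : Nat) : Int) := by omega
      rw [hcnt, pyRange_zero_cast, Int.toNat_natCast]
      have hini : (dpB (arr.take N) N (m+1), resB (arr.take N) N (m+1))
          = (dpI (arr.take N) N (m+2) 0, resI (arr.take N) N (m+2) 0) := by
        rw [dpI0, resI0]
        rfl
      rw [hini, loop2_inner arr N hle (m+2) (by omega) (by omega) (N-m-1) (by omega)]
      rw [show N - m - 1 = N + 1 - (m+2) from by omega]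
      rw [dpI_full _ _ _ (by omega) (by omega), resI_full _ _ _ (by omega) (by omega) ha]

theorem Aside (n : Int) (arr : List Int) (h0 : 0 < n) (hle : n ≤ (arr.length : Int)) :
    find_greatness n arr
      = (List.range n.toNat).map (fun k => Rbest (arr.take n.toNat) (k+1)) := by
  have hN : 1 ≤ n.toNat := by omega
  have hlen : n.toNat ≤ arr.length := by omega
  have ha : (arr.take n.toNat).length = n.toNat := by rw [List.length_take]; omega
  rw [find_greatness_as_folds]
  rw [pyRange_zero_cast n]
  have hdp0 : ((List.range n.toNat).map (fun k : Nat => (k:Int))).map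
        (fun _ => List.replicate ((n+1)).toNat 0)
      = List.replicate n.toNat (row0 n.toNat) := by
    rw [map_ignore]
    simp only [List.length_map, List.length_range]
    unfold row0
    rw [show ((n+1 : Int)).toNat = n.toNat + 1 from by omega]
  rw [hdp0]
  rw [loop1_inv arr n.toNat hN hlen n.toNat (le_refl _)]
  rw [dpA_full_eq, resA_full_eq _ _ hN ha]
  rw [PySem.List.pyRange_one 2 (n+1)]
  rw [show ((n + 1 - 2 : Int)).toNat = n.toNat - 1 from by omega]
  rw [loop2_outer arr n.toNat hN hlen n (by omega) (n.toNat - 1) (le_refl _)]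
  rw [show n.toNat - 1 + 1 = n.toNat from by omega]
  unfold resB
  apply List.map_congr_left
  intro L0 hL0
  rw [if_pos (List.mem_range.1 hL0)]


-- ===== B-side step functions (shapes of the port's folds) =====
def stepM (arr : List Int) (st : List (Int × Int) × List Int) (j : Int) :
    List (Int × Int) × List Int :=
  let x := PySem.List.pyGetD arr j 0
  let nxt := st.1.foldl
    (fun (nxt : List (Int × Int)) gl =>
      let g := gcf gl.1 x
      if nxt.getLast?.map Prod.fst = some g then nxt else nxt ++ [(g, gl.2)])
    []
  let nxt := if nxt.getLast?.map Prod.fst ≠ some x then nxt ++ [(x, j)] else nxt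
  let best' := nxt.foldl
    (fun best gl =>
      if gl.1 > PySem.List.pyGetD best (j - gl.2 + 1) 0
      then PySem.List.pySetD best (j - gl.2 + 1) gl.1 else best)
    st.2
  (nxt, best')

def stepS (best : List Int) (L : Int) : List Int :=
  if PySem.List.pyGetD best L 0 < PySem.List.pyGetD best (L + 1) 0
  then PySem.List.pySetD best L (PySem.List.pyGetD best (L + 1) 0) else best

theorem alt_as_folds (n : Int) (arr : List Int) :
    find_greatness_alt n arr =
      PySem.List.slice
        ((PySem.List.pyRange (n - 1) 0 (-1)).foldl stepS
          (((PySem.List.pyRange 0 n 1).foldl (stepM arr)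
              ([], List.replicate (n+1).toNat 0)).2))
        (some 1) none := rfl

-- ===== stack characterisation (Vw-valued) =====
theorem gcf_Vw_step (a : List Int) (l m : Nat) (hl : l ≤ m) (hm : m < a.length) :
    gcf (Vw (win a l (m-l))) (a.getD m 0) = Vw (win a l (m+1-l)) := by
  have hw : win a l (m+1-l) = win a l (m-l) ++ [a.getD m 0] := by
    rw [show m+1-l = (m-l)+1 from by omega]
    have h2 := win_snoc a l (m-l) (by omega)
    rw [show l + (m-l) = m from by omega] at h2
    exact h2
  rw [hw, Vw_snoc]

-- getD/set helpers
theorem getD_set_ne (l : List Int) (i j : Nat) (v d : Int) (h : ¬ i = j) :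
    (l.set i v).getD j d = l.getD j d := by
  simp [List.getD, h]

theorem getD_set_self (l : List Int) (i : Nat) (v : Int) (h : i < l.length) :
    (l.set i v).getD i 0 = v := by
  simp [List.getD, h]

def smaxF (ans : List Int) (L d : Nat) : Int :=
  match d with
  | 0 => ans.getD L 0
  | d+1 => max (ans.getD L 0) (smaxF ans (L+1) d)

theorem getD_le_smaxF (ans : List Int) (L d L' : Nat) (h1 : L ≤ L') (h2 : L' ≤ L + d) :
    ans.getD L' 0 ≤ smaxF ans L d := by
  induction d generalizing L with
  | zero =>
      have : L' = L := by omega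
      subst this
      exact le_refl _
  | succ d ih =>
      unfold smaxF
      by_cases hc : L' = L
      · subst hc; exact le_max_left _ _
      · exact le_trans (ih (L+1) (by omega) (by omega)) (le_max_right _ _)

theorem smaxF_le (ans : List Int) (L d : Nat) (c : Int)
    (h : ∀ L', L ≤ L' → L' ≤ L + d → ans.getD L' 0 ≤ c) : smaxF ans L d ≤ c := by
  induction d generalizing L with
  | zero => exact h L (le_refl _) (by omega)
  | succ d ih =>
      unfold smaxF
      apply max_le (h L (le_refl _) (by omega))
      exact ih (L+1) (fun L' ha hb => h L' (by omega) (by omega))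

theorem tail_map_range {α : Type} (f : Nat → α) (N : Nat) :
    ((List.range (N+1)).map f).tail = (List.range N).map (fun k => f (k+1)) := by
  rw [List.range_succ_eq_map]
  simp [List.map_map, Function.comp]

def Sound (a : List Int) (m : Nat) (stack : List (Int × Int)) : Prop :=
  ∀ gl ∈ stack, ∃ l : Nat, gl.2 = (l:Int) ∧ l < m ∧ gl.1 = Vw (win a l (m - l))
def Cover (a : List Int) (m : Nat) (stack : List (Int × Int)) : Prop :=
  ∀ i : Nat, i < m → ∃ gl ∈ stack, ∃ l : Nat,
    gl.2 = (l:Int) ∧ l ≤ i ∧ gl.1 = Vw (win a i (m - i))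
def StOrd (stack : List (Int × Int)) : Prop := stack.Pairwise (fun p q => p.2 < q.2)

def buildF (x : Int) (acc stack : List (Int × Int)) : List (Int × Int) :=
  stack.foldl
    (fun (nw : List (Int × Int)) gl =>
      let g2 := gcf gl.1 x
      if nw.getLast?.map Prod.fst = some g2 then nw else nw ++ [(g2, gl.2)])
    acc

theorem build_fold (x : Int) (stack : List (Int × Int)) :
    ∀ acc : List (Int × Int), StOrd stack → StOrd acc →
    (∀ q ∈ acc, ∀ gl ∈ stack, q.2 < gl.2) →
    acc <+: buildF x acc stack ∧ StOrd (buildF x acc stack)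
    ∧ (∀ q ∈ buildF x acc stack, q ∈ acc ∨ ∃ gl ∈ stack, q = (gcf gl.1 x, gl.2))
    ∧ (∀ gl ∈ stack, ∃ q ∈ buildF x acc stack, q.2 ≤ gl.2 ∧ q.1 = gcf gl.1 x) := by
  induction stack with
  | nil =>
      intro acc _ hao _
      refine ⟨List.prefix_refl _, hao, ?_, ?_⟩
      · intro q hq; exact Or.inl hq
      · intro gl hgl; cases hgl
  | cons gl rest ih =>
      intro acc hso hao hcross
      have hso' : StOrd rest := (List.pairwise_cons.1 hso).2
      have hglrest : ∀ g ∈ rest, gl.2 < g.2 := (List.pairwise_cons.1 hso).1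
      have hstep : buildF x acc (gl :: rest)
          = buildF x (if acc.getLast?.map Prod.fst = some (gcf gl.1 x) then acc
                      else acc ++ [(gcf gl.1 x, gl.2)]) rest := rfl
      by_cases hc : acc.getLast?.map Prod.fst = some (gcf gl.1 x)
      · rw [hstep, if_pos hc]
        obtain ⟨hpre, hord, hP2, hP3⟩ := ih acc hso' hao
          (fun q hq g hg => hcross q hq g (List.mem_cons_of_mem _ hg))
        refine ⟨hpre, hord, ?_, ?_⟩
        · intro q hq
          rcases hP2 q hq with h | ⟨g, hg, he⟩
          · exact Or.inl h
          · exact Or.inr ⟨g, List.mem_cons_of_mem _ hg, he⟩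
        · intro g hg
          rcases List.mem_cons.1 hg with h | h
          · -- the skipped head: witness is acc's last element
            obtain ⟨q, hq1, hq2⟩ : ∃ q, acc.getLast? = some q ∧ q.1 = gcf gl.1 x := by
              cases hl : acc.getLast? with
              | none => rw [hl] at hc; simp at hc
              | some q =>
                  rw [hl] at hc
                  simp at hc
                  exact ⟨q, rfl, hc⟩
            have hqacc : q ∈ acc := List.mem_of_getLast? hq1
            refine ⟨q, hpre.subset hqacc, ?_, ?_⟩
            · rw [h]
              exact le_of_lt (hcross q hqacc gl List.mem_cons_self)
            · rw [h]; exact hq2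
          · exact hP3 g h
      · rw [hstep, if_neg hc]
        have hao' : StOrd (acc ++ [(gcf gl.1 x, gl.2)]) := by
          unfold StOrd
          rw [List.pairwise_append]
          refine ⟨hao, List.pairwise_singleton _ _, ?_⟩
          intro q hq e he
          rcases List.mem_singleton.1 he with rfl
          exact hcross q hq gl List.mem_cons_self
        have hcross' : ∀ q ∈ acc ++ [(gcf gl.1 x, gl.2)], ∀ g ∈ rest, q.2 < g.2 := by
          intro q hq g hg
          rcases List.mem_append.1 hq with h | h
          · exact lt_trans (hcross q h gl List.mem_cons_self) (hglrest g hg)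
          · rcases List.mem_singleton.1 h with rfl
            exact hglrest g hg
        obtain ⟨hpre, hord, hP2, hP3⟩ := ih (acc ++ [(gcf gl.1 x, gl.2)]) hso' hao' hcross'
        refine ⟨((List.prefix_append _ _).trans hpre), hord, ?_, ?_⟩
        · intro q hq
          rcases hP2 q hq with h | ⟨g, hg, he⟩
          · rcases List.mem_append.1 h with h' | h'
            · exact Or.inl h'
            · rcases List.mem_singleton.1 h' with rfl
              exact Or.inr ⟨gl, List.mem_cons_self, rfl⟩
          · exact Or.inr ⟨g, List.mem_cons_of_mem _ hg, he⟩
        · intro g hg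
          rcases List.mem_cons.1 hg with h | h
          · subst h
            refine ⟨(gcf g.1 x, g.2), hpre.subset (by simp), le_refl _, rfl⟩
          · exact hP3 g h

theorem stack_step (a : List Int) (m : Nat) (hm : m < a.length)
    (stack nw nw2 : List (Int × Int))
    (hnw : nw = buildF (a.getD m 0) [] stack)
    (hnw2 : nw2 = if nw.getLast?.map Prod.fst ≠ some (a.getD m 0)
        then nw ++ [(a.getD m 0, (m:Int))] else nw)
    (hS : Sound a m stack) (hC : Cover a m stack) (hO : StOrd stack) :
    Sound a (m+1) nw2 ∧ Cover a (m+1) nw2 ∧ StOrd nw2 := by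
  obtain ⟨hpre, hord, hP2, hP3⟩ := build_fold (a.getD m 0) stack [] hO (List.Pairwise.nil)
    (by intro q hq; cases hq)
  rw [← hnw] at hpre hord hP2 hP3
  have hxval : a.getD m 0 = Vw (win a m (m + 1 - m)) := by
    rw [show m + 1 - m = 1 from by omega, win_one a m hm, Vw_singleton]
  have hsound_nw : Sound a (m+1) nw := by
    intro q hq
    rcases hP2 q hq with h | ⟨g, hg, he⟩
    · cases h
    · obtain ⟨l, hl1, hl2, hl3⟩ := hS g hg
      refine ⟨l, ?_, by omega, ?_⟩
      · rw [he, hl1]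
      · rw [he]
        simp only []
        rw [hl3, gcf_Vw_step a l m (by omega) hm]
  have hsnd_lt : ∀ q ∈ nw, q.2 < (m:Int) := by
    intro q hq
    rcases hP2 q hq with h | ⟨g, hg, he⟩
    · cases h
    · obtain ⟨l, hl1, hl2, _⟩ := hS g hg
      rw [he]
      simp only []
      rw [hl1]
      exact_mod_cast hl2
  have hsub : ∀ q ∈ nw, q ∈ nw2 := by
    intro q hq
    rw [hnw2]
    split_ifs
    · exact List.mem_append_left _ hq
    · exact hq
  have hsound : Sound a (m+1) nw2 := by
    intro q hq
    rw [hnw2] at hq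
    by_cases hc : nw.getLast?.map Prod.fst ≠ some (a.getD m 0)
    · rw [if_pos hc] at hq
      rcases List.mem_append.1 hq with h | h
      · exact hsound_nw q h
      · rcases List.mem_singleton.1 h with rfl
        exact ⟨m, rfl, by omega, hxval⟩
    · rw [if_neg hc] at hq
      exact hsound_nw q hq
  refine ⟨hsound, ?_, ?_⟩
  · -- Cover
    intro i hi
    by_cases hcm : i = m
    · subst hcm
      by_cases hc : nw.getLast?.map Prod.fst ≠ some (a.getD i 0)
      · refine ⟨(a.getD i 0, (i:Int)), ?_, i, rfl, le_refl _, hxval⟩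
        rw [hnw2, if_pos hc]
        simp
      · push_neg at hc
        obtain ⟨q, hq1, hq2⟩ : ∃ q, nw.getLast? = some q ∧ q.1 = a.getD i 0 := by
          cases hl : nw.getLast? with
          | none => rw [hl] at hc; simp at hc
          | some q => rw [hl] at hc; simp at hc; exact ⟨q, rfl, hc⟩
        have hqnw : q ∈ nw := List.mem_of_getLast? hq1
        obtain ⟨l, hl1, hl2, _⟩ := hsound_nw q hqnw
        exact ⟨q, hsub q hqnw, l, hl1, by omega, by rw [hq2, hxval]⟩
    · have him : i < m := by omega
      obtain ⟨g, hg, l, hl1, hl2, hl3⟩ := hC i him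
      obtain ⟨q, hq, hq2, hq3⟩ := hP3 g hg
      obtain ⟨l', hl'1, hl'2, _⟩ := hsound_nw q hq
      refine ⟨q, hsub q hq, l', hl'1, ?_, ?_⟩
      · have : (l':Int) ≤ (l:Int) := by rw [← hl'1, ← hl1]; exact le_trans hq2 (le_refl _)
        have : l' ≤ l := by exact_mod_cast this
        omega
      · rw [hq3, hl3, gcf_Vw_step a i m (by omega) hm]
  · -- StOrd
    rw [hnw2]
    split_ifs
    · unfold StOrd
      rw [List.pairwise_append]
      refine ⟨hord, List.pairwise_singleton _ _, ?_⟩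
      intro q hq e he
      rcases List.mem_singleton.1 he with rfl
      exact hsnd_lt q hq
    · exact hord

theorem events_fold (a : List Int) (N : Nat) (ha : a.length = N) (m : Nat) (hm : m < N)
    (lst : List (Int × Int)) (hS : Sound a (m+1) lst)
    (hval : ∀ gl ∈ lst, ∀ l : Nat, gl.2 = (l:Int) → l ≤ m → gl.1 ≤ Rbest a (m + 1 - l)) :
    ∀ ans : List Int, ans.length = N+1 →
    (lst.foldl
      (fun ans gl =>
        if gl.1 > PySem.List.pyGetD ans ((m:Int) - gl.2 + 1) 0
        then PySem.List.pySetD ans ((m:Int) - gl.2 + 1) gl.1 else ans) ans).length = N+1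
    ∧ (∀ L : Nat, ans.getD L 0 ≤
        (lst.foldl (fun ans gl =>
          if gl.1 > PySem.List.pyGetD ans ((m:Int) - gl.2 + 1) 0
          then PySem.List.pySetD ans ((m:Int) - gl.2 + 1) gl.1 else ans) ans).getD L 0)
    ∧ ((∀ L, 1 ≤ L → L ≤ N → ans.getD L 0 ≤ Rbest a L) →
        ∀ L, 1 ≤ L → L ≤ N →
        (lst.foldl (fun ans gl =>
          if gl.1 > PySem.List.pyGetD ans ((m:Int) - gl.2 + 1) 0
          then PySem.List.pySetD ans ((m:Int) - gl.2 + 1) gl.1 else ans) ans).getD L 0 ≤ Rbest a L)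
    ∧ (∀ gl ∈ lst, ∀ l : Nat, gl.2 = (l:Int) → l ≤ m →
        gl.1 ≤ (lst.foldl (fun ans gl =>
          if gl.1 > PySem.List.pyGetD ans ((m:Int) - gl.2 + 1) 0
          then PySem.List.pySetD ans ((m:Int) - gl.2 + 1) gl.1 else ans) ans).getD (m + 1 - l) 0)
    ∧ ((∀ L : Nat, 0 ≤ ans.getD L 0) →
        ∀ L : Nat, 0 ≤ (lst.foldl (fun ans gl =>
          if gl.1 > PySem.List.pyGetD ans ((m:Int) - gl.2 + 1) 0
          then PySem.List.pySetD ans ((m:Int) - gl.2 + 1) gl.1 else ans) ans).getD L 0) := by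
  induction lst with
  | nil =>
      intro ans hlen
      simp only [List.foldl_nil]
      refine ⟨hlen, fun L => le_refl _, fun h => h, ?_, fun h => h⟩
      intro gl hgl; cases hgl
  | cons gl rest ih =>
      intro ans hlen
      obtain ⟨l, hl1, hl2, hl3⟩ := hS gl List.mem_cons_self
      have hlm : l ≤ m := by omega
      have hidx : (m:Int) - gl.2 + 1 = ((m + 1 - l : Nat) : Int) := by
        rw [hl1]; omega
      have hidxlt : m + 1 - l < N + 1 := by omega
      simp only [List.foldl_cons]
      have hS' : Sound a (m+1) rest := fun q hq => hS q (List.mem_cons_of_mem _ hq)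
      have hval' : ∀ g ∈ rest, ∀ l : Nat, g.2 = (l:Int) → l ≤ m → g.1 ≤ Rbest a (m + 1 - l) :=
        fun g hg => hval g (List.mem_cons_of_mem _ hg)
      set ans1 := (if gl.1 > PySem.List.pyGetD ans ((m:Int) - gl.2 + 1) 0
          then PySem.List.pySetD ans ((m:Int) - gl.2 + 1) gl.1 else ans) with hans1
      have hlen1 : ans1.length = N+1 := by
        rw [hans1]
        split_ifs
        · rw [hidx, PySem.List.pySetD_natCast, List.length_set]; exact hlen
        · exact hlen
      have hmono1 : ∀ L : Nat, ans.getD L 0 ≤ ans1.getD L 0 := by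
        intro L
        rw [hans1]
        split_ifs with hcf
        · rw [hidx] at hcf ⊢
          rw [PySem.List.pyGetD_natCast] at hcf
          rw [PySem.List.pySetD_natCast]
          by_cases hL : L = m + 1 - l
          · subst hL
            rw [getD_set_self _ _ _ (by omega)]
            omega
          · rw [getD_set_ne _ _ _ _ _ (by omega)]
        · exact le_refl _
      have hwr1 : gl.1 ≤ ans1.getD (m + 1 - l) 0 := by
        rw [hans1]
        split_ifs with hcf
        · rw [hidx, PySem.List.pySetD_natCast]
          rw [getD_set_self _ _ _ (by omega)]
        · rw [hidx, PySem.List.pyGetD_natCast] at hcf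
          omega
      have hle1 : (∀ L, 1 ≤ L → L ≤ N → ans.getD L 0 ≤ Rbest a L) →
          ∀ L, 1 ≤ L → L ≤ N → ans1.getD L 0 ≤ Rbest a L := by
        intro h L h1 h2
        rw [hans1]
        split_ifs with hcf
        · rw [hidx, PySem.List.pySetD_natCast]
          by_cases hL : L = m + 1 - l
          · subst hL
            rw [getD_set_self _ _ _ (by omega)]
            exact hval gl List.mem_cons_self l hl1 hlm
          · rw [getD_set_ne _ _ _ _ _ (by omega)]
            exact h L h1 h2
        · exact h L h1 h2
      have hnn1 : (∀ L : Nat, 0 ≤ ans.getD L 0) → ∀ L : Nat, 0 ≤ ans1.getD L 0 := by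
        intro h L
        exact le_trans (h L) (hmono1 L)
      obtain ⟨ihlen, ihmono, ihle, ihwr, ihnn⟩ := ih hS' hval' ans1 hlen1
      refine ⟨ihlen, ?_, ?_, ?_, ?_⟩
      · intro L; exact le_trans (hmono1 L) (ihmono L)
      · intro h; exact ihle (hle1 h)
      · intro g hg l' hgl' hl'm
        rcases List.mem_cons.1 hg with h | h
        · subst h
          have : l' = l := by
            have : ((l':Nat):Int) = ((l:Nat):Int) := by rw [← hgl', ← hl1]
            exact_mod_cast this
          subst this
          exact le_trans hwr1 (ihmono (m + 1 - l'))
        · exact ihwr g h l' hgl' hl'm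
      · intro h; exact ihnn (hnn1 h)


theorem getD_replicate_zero (k L : Nat) : (List.replicate k (0:Int)).getD L 0 = 0 := by
  by_cases h : L < k
  · rw [List.getD_eq_getElem _ _ (by simpa using h)]
    simp
  · rw [List.getD_eq_default _ _ (by simpa using h)]

theorem main_inv (arr : List Int) (N : Nat) (hN : 1 ≤ N) (hle : N ≤ arr.length) :
    ∀ (m : Nat), m ≤ N → ∀ (sp : List (Int × Int)) (ap : List Int),
    ((List.range m).map (fun k : Nat => (k:Int))).foldl
        (stepM arr) ([], List.replicate (N+1) 0) = (sp, ap) →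
    Sound (arr.take N) m sp ∧ Cover (arr.take N) m sp ∧ StOrd sp
    ∧ ap.length = N+1
    ∧ (∀ L : Nat, 0 ≤ ap.getD L 0)
    ∧ (∀ L, 1 ≤ L → L ≤ N → ap.getD L 0 ≤ Rbest (arr.take N) L)
    ∧ (∀ i j : Nat, i ≤ j → j < m →
        ∃ L', j+1-i ≤ L' ∧ L' ≤ N ∧ Vw (win (arr.take N) i (j+1-i)) ≤ ap.getD L' 0) := by
  have ha : (arr.take N).length = N := by rw [List.length_take]; omega
  intro m
  induction m with
  | zero =>
      intro _ sp ap hfold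
      simp only [List.range_zero, List.map_nil, List.foldl_nil] at hfold
      injection hfold with h1 h2
      subst h1; subst h2
      refine ⟨?_, ?_, ?_, by simp, ?_, ?_, ?_⟩
      · intro g hg; cases hg
      · intro i hi; omega
      · exact List.Pairwise.nil
      · intro L; rw [getD_replicate_zero]
      · intro L _ _; rw [getD_replicate_zero]; exact Rbest_nonneg _ _
      · intro i j _ hj; omega
  | succ m ih =>
      intro hm sp ap hfold
      rw [List.range_succ, List.map_append, List.foldl_append] at hfold
      rcases heq : ((List.range m).map (fun k : Nat => (k:Int))).foldl
          (stepM arr) ([], List.replicate (N+1) 0) with ⟨sp', ap'⟩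
      rw [heq] at hfold
      obtain ⟨hS', hC', hO', hlen', hnn', hle', hge'⟩ := ih (by omega) sp' ap' heq
      simp only [List.map_cons, List.map_nil, List.foldl_cons, List.foldl_nil] at hfold
      unfold stepM at hfold
      simp only [PySem.List.pyGetD_natCast] at hfold
      rw [← getD_take arr N m 0 (by omega)] at hfold
      have hmlt : m < (arr.take N).length := by omega
      injection hfold with h1 h2
      obtain ⟨hsound, hcover, hord⟩ := stack_step (arr.take N) m hmlt sp'
        (buildF ((arr.take N).getD m 0) [] sp') sp rfl h1.symm hS' hC' hO'
      refine ⟨hsound, hcover, hord, ?_⟩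
      have hval : ∀ gl ∈ sp, ∀ l : Nat, gl.2 = (l:Int) → l ≤ m →
          gl.1 ≤ Rbest (arr.take N) (m + 1 - l) := by
        intro gl hgl l hgl2 hlm
        obtain ⟨l', hl'1, hl'2, hl'3⟩ := hsound gl hgl
        have hll : l' = l := by
          have : ((l':Nat):Int) = ((l:Nat):Int) := by rw [← hl'1, ← hgl2]
          exact_mod_cast this
        subst hll
        rw [hl'3]
        exact Vw_le_Rbest _ _ _ (by omega)
      have hevents := events_fold (arr.take N) N ha m (by omega) sp hsound hval ap' hlen'
      rw [h1] at h2
      rw [h2] at hevents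
      obtain ⟨helen, hemono, hele, hewr, henn⟩ := hevents
      refine ⟨helen, henn hnn', hele hle', ?_⟩
      intro i j hij hj
      by_cases hjm : j = m
      · subst hjm
        obtain ⟨gl, hgl, l, hgl2, hli, hglv⟩ := hcover i (by omega)
        refine ⟨j + 1 - l, by omega, by omega, ?_⟩
        have := hewr gl hgl l hgl2 (by omega)
        rw [hglv] at this
        exact this
      · obtain ⟨L', hL'1, hL'2, hL'3⟩ := hge' i j hij (by omega)
        exact ⟨L', hL'1, hL'2, le_trans hL'3 (hemono L')⟩

theorem smaxF_succ (ans : List Int) (L d : Nat) :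
    smaxF ans L (d+1) = max (ans.getD L 0) (smaxF ans (L+1) d) := rfl

theorem suffix_inv (N : Nat) (n : Int) (hn : n = (N:Int)) (hN : 1 ≤ N)
    (ansM : List Int) (hlen : ansM.length = N+1) :
    ∀ q : Nat, q ≤ N - 1 →
    ((List.range q).map (fun k : Nat => (n - 1 - (k:Int)))).foldl stepS ansM
    = (List.range (N+1)).map
        (fun L => if N - q ≤ L ∧ L ≤ N then smaxF ansM L (N - L) else ansM.getD L 0) := by
  intro q
  induction q with
  | zero =>
      intro _
      simp only [List.range_zero, List.map_nil, List.foldl_nil]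
      apply List.ext_getElem
      · simp [hlen]
      · intro i h1 h2
        simp only [List.getElem_map, List.getElem_range]
        split_ifs with hcc
        · rw [show N - i = 0 from by omega]
          unfold smaxF
          rw [List.getD_eq_getElem _ _ (by omega)]
        · rw [List.getD_eq_getElem _ _ (by omega)]
  | succ q ih =>
      intro hq
      rw [List.range_succ, List.map_append, List.foldl_append, ih (by omega)]
      simp only [List.map_cons, List.map_nil, List.foldl_cons, List.foldl_nil]
      unfold stepS
      have hi1 : n - 1 - (q:Int) = ((N - q - 1 : Nat) : Int) := by omega
      have hi2 : n - 1 - (q:Int) + 1 = ((N - q : Nat) : Int) := by omega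
      rw [hi2, hi1, PySem.List.pyGetD_natCast, PySem.List.pyGetD_natCast]
      have hA : ((List.range (N+1)).map
          (fun L => if N - q ≤ L ∧ L ≤ N then smaxF ansM L (N - L) else ansM.getD L 0)).getD
            (N - q - 1) 0 = ansM.getD (N - q - 1) 0 := by
        rw [PySem.List.getD_map_range _ _ _ _ (by omega), if_neg (by omega)]
      have hB : ((List.range (N+1)).map
          (fun L => if N - q ≤ L ∧ L ≤ N then smaxF ansM L (N - L) else ansM.getD L 0)).getD
            (N - q) 0 = smaxF ansM (N - q) q := by
        rw [PySem.List.getD_map_range _ _ _ _ (by omega), if_pos (by omega)]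
        rw [show N - (N - q) = q from by omega]
      rw [hA, hB]
      have hkey : smaxF ansM (N - q - 1) (N - (N - q - 1))
          = max (ansM.getD (N - q - 1) 0) (smaxF ansM (N - q) q) := by
        rw [show N - (N - q - 1) = q + 1 from by omega, smaxF_succ]
        rw [show N - q - 1 + 1 = N - q from by omega]
      split_ifs with hcf
      · rw [PySem.List.pySetD_natCast, map_range_set]
        apply List.map_congr_left
        intro L hL
        by_cases hc : L = N - q - 1
        · subst hc
          rw [if_pos rfl, if_pos (by omega), hkey, max_eq_right (le_of_lt hcf)]
        · rw [if_neg hc]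
          split_ifs <;> first | rfl | omega
      · apply List.map_congr_left
        intro L hL
        by_cases hc : L = N - q - 1
        · subst hc
          rw [if_neg (by omega), if_pos (by omega), hkey,
              max_eq_left (by omega)]
        · split_ifs <;> first | rfl | omega

theorem Bside (n : Int) (arr : List Int) (h0 : 0 < n) (hle : n ≤ (arr.length : Int)) :
    find_greatness_alt n arr
      = (List.range n.toNat).map (fun k => Rbest (arr.take n.toNat) (k+1)) := by
  have hN : 1 ≤ n.toNat := by omega
  have hlen : n.toNat ≤ arr.length := by omega
  have ha : (arr.take n.toNat).length = n.toNat := by rw [List.length_take]; omega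
  rw [alt_as_folds n arr]
  rw [pyRange_zero_cast n]
  rw [show (n+1).toNat = n.toNat + 1 from by omega]
  rcases heq : ((List.range n.toNat).map (fun k : Nat => (k:Int))).foldl
      (stepM arr) ([], List.replicate (n.toNat+1) 0) with ⟨sp, ap⟩
  obtain ⟨_, _, _, haplen, hapnn, haple, hapge⟩ :=
    main_inv arr n.toNat hN hlen n.toNat (le_refl _) sp ap heq
  rw [PySem.List.pyRange_neg_one (n-1) 0]
  rw [show ((n - 1 - 0 : Int)).toNat = n.toNat - 1 from by omega]
  rw [suffix_inv n.toNat n (by omega) hN ap haplen (n.toNat - 1) (le_refl _)]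
  rw [PySem.List.slice_from_one]
  rw [tail_map_range]
  apply List.map_congr_left
  intro L0 hL0
  have hL0r := List.mem_range.1 hL0
  rw [if_pos (by omega)]
  apply le_antisymm
  · apply smaxF_le
    intro L' hge hle'
    exact le_trans (haple L' (by omega) (by omega))
      (Rbest_antitone (arr.take n.toNat) (L0+1) L' (by omega) (by omega) (by omega))
  · apply foldl_max_le_of
    · exact le_trans (hapnn (L0+1)) (getD_le_smaxF ap (L0+1) _ (L0+1) (le_refl _) (by omega))
    · intro y hy
      rcases List.mem_map.1 hy with ⟨i, hi, rfl⟩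
      have hir : i < (arr.take n.toNat).length + 1 - (L0+1) := List.mem_range.1 hi
      have hwin : L0 + 1 = (i + L0) + 1 - i := by omega
      obtain ⟨L', hL'1, hL'2, hL'3⟩ := hapge i (i + L0) (by omega) (by omega)
      rw [← hwin] at hL'3
      exact le_trans hL'3 (getD_le_smaxF ap (L0+1) _ L' (by omega) (by omega))

theorem A_nonpos (n : Int) (arr : List Int) (h : n ≤ 0) : find_greatness n arr = [] := by
  rw [find_greatness_as_folds]
  have h1 : PySem.List.pyRange 0 n 1 = [] := by
    rw [PySem.List.pyRange_one, show ((n - 0 : Int)).toNat = 0 from by omega]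
    rfl
  have h2 : PySem.List.pyRange 2 (n+1) 1 = [] := by
    rw [PySem.List.pyRange_one, show ((n + 1 - 2 : Int)).toNat = 0 from by omega]
    rfl
  rw [h1, h2]
  simp only [List.foldl_nil]
  rw [show n.toNat = 0 from by omega]
  rfl

theorem B_nonpos (n : Int) (arr : List Int) (h : n ≤ 0) : find_greatness_alt n arr = [] := by
  rw [alt_as_folds]
  have h1 : PySem.List.pyRange 0 n 1 = [] := by
    rw [PySem.List.pyRange_one, show ((n - 0 : Int)).toNat = 0 from by omega]
    rfl
  have h2 : PySem.List.pyRange (n-1) 0 (-1) = [] :=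
    PySem.List.pyRange_neg_one_eq_nil (by omega)
  rw [h1, h2]
  simp only [List.foldl_nil]
  rw [PySem.List.slice_from_one]
  have : (n+1).toNat = 0 ∨ (n+1).toNat = 1 := by omega
  rcases this with h3 | h3 <;> rw [h3] <;> rfl

theorem AB_equiv (n : Int) (arr : List Int) (hpre : n ≤ (arr.length : Int)) :
    find_greatness n arr = find_greatness_alt n arr := by
  by_cases h : n ≤ 0
  · rw [A_nonpos n arr h, B_nonpos n arr h]
  · rw [Aside n arr (by omega) hpre, Bside n arr (by omega) hpre]

-- ===== VERDICT (by name: the statement is the Claim_ definition above) =====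
theorem find_greatness_spec : Claim_equal_find_greatness := by
  intro n arr _ hpre
  exact AB_equiv n arr hpre
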